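-- pv_equiv track=rewrite | github.com/vfskrum19/college-bball-metrics | scrapers/fetch_game_scores_espn.py | strip_mascot
-- ===== SOURCE A (Python) =====
-- def strip_mascot(name):
--     """
--     Strip mascot from an ESPN display name.
--     ESPN format is always: "School Name Mascot(s)"
--     Strategy: try known multi-word mascots first, then strip last word.
--     """
--     # Multi-word mascots (last word alone would leave a partial name)
--     multi_word_mascots = [
--         " ragin' cajuns", ' blue devils', ' tar heels', ' crimson tide',
--         ' yellow jackets', ' demon deacons', ' fighting irish', ' golden gophers',
--         ' red raiders', ' horned frogs', ' sun devils', ' wolf pack',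
--         ' running rebels', ' rainbow warriors', ' mean green', ' red wolves',
--         ' golden lions', ' black knights', ' fighting camels', ' golden griffins',
--         ' blue hens', ' fighting illini', ' golden flashes', ' mountain hawks',
--         ' black bears', ' red foxes', ' golden eagles', ' great danes',
--         ' river hawks', ' purple eagles', ' fighting hawks', ' blue hose',
--         ' big red', ' big green', ' golden hurricane', ' red storm',
--         ' golden grizzlies', ' green wave', ' thundering herd', ' blue demons',
--         ' nittany lions', ' delta devils', ' golden suns', ' red flash',
--         ' scarlet knights', ' golden bears', ' screaming eagles',
--         ' purple aces', " runnin' bulldogs",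
--     ]
--
--     for mascot in multi_word_mascots:
--         if name.endswith(mascot):
--             return name[:-len(mascot)].strip()
--
--     # Single-word mascots: just strip the last word
--     # This handles ALL single-word mascots (bulldogs, zips, monarchs, billikens, etc.)
--     parts = name.rsplit(' ', 1)
--     if len(parts) == 2 and len(parts[0]) >= 2:
--         return parts[0].strip()
--
--     return name
-- ===== SOURCE B (Python) =====
-- # Word-based re-implementation: split the name once into space-separated words and
-- # look the last two words up in a frozenset, instead of trying 48 endswith calls.
--
-- _MULTI_WORD_MASCOTS = frozenset([
--     ("ragin'", 'cajuns'), ('blue', 'devils'), ('tar', 'heels'), ('crimson', 'tide'),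
--     ('yellow', 'jackets'), ('demon', 'deacons'), ('fighting', 'irish'), ('golden', 'gophers'),
--     ('red', 'raiders'), ('horned', 'frogs'), ('sun', 'devils'), ('wolf', 'pack'),
--     ('running', 'rebels'), ('rainbow', 'warriors'), ('mean', 'green'), ('red', 'wolves'),
--     ('golden', 'lions'), ('black', 'knights'), ('fighting', 'camels'), ('golden', 'griffins'),
--     ('blue', 'hens'), ('fighting', 'illini'), ('golden', 'flashes'), ('mountain', 'hawks'),
--     ('black', 'bears'), ('red', 'foxes'), ('golden', 'eagles'), ('great', 'danes'),
--     ('river', 'hawks'), ('purple', 'eagles'), ('fighting', 'hawks'), ('blue', 'hose'),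
--     ('big', 'red'), ('big', 'green'), ('golden', 'hurricane'), ('red', 'storm'),
--     ('golden', 'grizzlies'), ('green', 'wave'), ('thundering', 'herd'), ('blue', 'demons'),
--     ('nittany', 'lions'), ('delta', 'devils'), ('golden', 'suns'), ('red', 'flash'),
--     ('scarlet', 'knights'), ('golden', 'bears'), ('screaming', 'eagles'),
--     ('purple', 'aces'), ("runnin'", 'bulldogs'),
-- ])
--
--
-- def strip_mascot(name):
--     """
--     Strip mascot from an ESPN display name.
--     ESPN format is always: "School Name Mascot(s)"
--     Word-based strategy: check the last two words against the known multi-word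
--     mascots, otherwise strip the last word.
--     """
--     words = name.split(' ')
--     # A known two-word mascot needs at least one (possibly empty) word before it,
--     # i.e. at least three words in total.
--     if len(words) >= 3 and (words[-2], words[-1]) in _MULTI_WORD_MASCOTS:
--         return ' '.join(words[:-2]).strip()
--     # Single-word mascot: strip the last word.
--     if len(words) >= 2:
--         head = ' '.join(words[:-1])
--         if len(head) >= 2:
--             return head.strip()
--     return name
-- ===== Notes on version B (the rewrite author's own statement) =====
-- stated objective: idiomatic
-- what changed: Instead of probing the name with 48 endswith calls against mascot suffix strings, B splits the name once into space-separated words and looks the last two words up in a frozenset of word pairs (falling back to joining all but the last word).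
import Mathlib
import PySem

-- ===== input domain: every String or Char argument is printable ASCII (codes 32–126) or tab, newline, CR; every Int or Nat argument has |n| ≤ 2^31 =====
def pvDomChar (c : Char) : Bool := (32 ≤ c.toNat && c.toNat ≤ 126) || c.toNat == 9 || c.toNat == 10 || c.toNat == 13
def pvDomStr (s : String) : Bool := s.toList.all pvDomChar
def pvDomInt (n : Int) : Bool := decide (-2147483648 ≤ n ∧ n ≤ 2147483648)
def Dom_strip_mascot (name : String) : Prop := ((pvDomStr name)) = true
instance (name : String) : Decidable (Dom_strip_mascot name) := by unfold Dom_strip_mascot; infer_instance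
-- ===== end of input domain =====

-- B replaces A's 48 endswith probes by one split into words plus a set lookup of the
-- last two words (objective: idiomatic); return values agree on every input.

-- ===== PORT A =====
def multiWordMascots : List String := [
  " ragin' cajuns", " blue devils", " tar heels", " crimson tide",
  " yellow jackets", " demon deacons", " fighting irish", " golden gophers",
  " red raiders", " horned frogs", " sun devils", " wolf pack",
  " running rebels", " rainbow warriors", " mean green", " red wolves",
  " golden lions", " black knights", " fighting camels", " golden griffins",
  " blue hens", " fighting illini", " golden flashes", " mountain hawks",
  " black bears", " red foxes", " golden eagles", " great danes",
  " river hawks", " purple eagles", " fighting hawks", " blue hose",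
  " big red", " big green", " golden hurricane", " red storm",
  " golden grizzlies", " green wave", " thundering herd", " blue demons",
  " nittany lions", " delta devils", " golden suns", " red flash",
  " scarlet knights", " golden bears", " screaming eagles",
  " purple aces", " runnin' bulldogs"]

-- the 'for mascot in multi_word_mascots' loop: first match returns name[:-len(mascot)].strip()
def stripLoopA : List String → List Char → Option (List Char)
  | [], _ => none
  | m :: ms, l =>
    if PySem.Chars.endswith l m.toList then
      some (PySem.Chars.strip (PySem.List.slice l none (some (-(m.toList.length : Int)))))
    else stripLoopA ms l

def strip_mascot (name : String) : String :=
  let l := name.toList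
  match stripLoopA multiWordMascots l with
  | some r => String.ofList r
  | none =>
    -- hand port of parts = name.rsplit(' ', 1): exact for a 1-char separator via rfind;
    -- j = -1 means parts = [name] (so len(parts) == 2 is false), else parts = [name[:j], name[j+1:]]
    let j := PySem.Chars.rfind l [' ']
    if j = -1 then name
    else if 2 ≤ (l.take j.toNat).length then String.ofList (PySem.Chars.strip (l.take j.toNat))
    else name

-- ===== PORT B =====
def mascotWordPairs : List (List Char × List Char) := [
  ("ragin'".toList, "cajuns".toList), ("blue".toList, "devils".toList),
  ("tar".toList, "heels".toList), ("crimson".toList, "tide".toList),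
  ("yellow".toList, "jackets".toList), ("demon".toList, "deacons".toList),
  ("fighting".toList, "irish".toList), ("golden".toList, "gophers".toList),
  ("red".toList, "raiders".toList), ("horned".toList, "frogs".toList),
  ("sun".toList, "devils".toList), ("wolf".toList, "pack".toList),
  ("running".toList, "rebels".toList), ("rainbow".toList, "warriors".toList),
  ("mean".toList, "green".toList), ("red".toList, "wolves".toList),
  ("golden".toList, "lions".toList), ("black".toList, "knights".toList),
  ("fighting".toList, "camels".toList), ("golden".toList, "griffins".toList),
  ("blue".toList, "hens".toList), ("fighting".toList, "illini".toList),
  ("golden".toList, "flashes".toList), ("mountain".toList, "hawks".toList),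
  ("black".toList, "bears".toList), ("red".toList, "foxes".toList),
  ("golden".toList, "eagles".toList), ("great".toList, "danes".toList),
  ("river".toList, "hawks".toList), ("purple".toList, "eagles".toList),
  ("fighting".toList, "hawks".toList), ("blue".toList, "hose".toList),
  ("big".toList, "red".toList), ("big".toList, "green".toList),
  ("golden".toList, "hurricane".toList), ("red".toList, "storm".toList),
  ("golden".toList, "grizzlies".toList), ("green".toList, "wave".toList),
  ("thundering".toList, "herd".toList), ("blue".toList, "demons".toList),
  ("nittany".toList, "lions".toList), ("delta".toList, "devils".toList),
  ("golden".toList, "suns".toList), ("red".toList, "flash".toList),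
  ("scarlet".toList, "knights".toList), ("golden".toList, "bears".toList),
  ("screaming".toList, "eagles".toList), ("purple".toList, "aces".toList),
  ("runnin'".toList, "bulldogs".toList)]

-- the frozenset of word pairs
def mascotWordSet : PySem.Set (List Char × List Char) := PySem.Set.ofList mascotWordPairs

def strip_mascot_alt (name : String) : String :=
  let words := PySem.Chars.splitOn name.toList [' ']
  if 3 ≤ words.length ∧
      (PySem.List.pyGetD words (-2) [], PySem.List.pyGetD words (-1) []) ∈ mascotWordSet then
    String.ofList (PySem.Chars.strip
      (PySem.Chars.join [' '] (PySem.List.slice words none (some (-2)))))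
  else if 2 ≤ words.length then
    let head := PySem.Chars.join [' '] (PySem.List.slice words none (some (-1)))
    if 2 ≤ head.length then String.ofList (PySem.Chars.strip head) else name
  else name

-- ===== PRECONDITION & SPEC =====
def Spec_strip_mascot (name : String) (out : String) : Prop := out = strip_mascot_alt name
instance (name : String) (out : String) : Decidable (Spec_strip_mascot name out) := by unfold Spec_strip_mascot; infer_instance

-- ===== CLAIM (what is proved, stated in full; the proofs are below) =====
def Claim_equal_strip_mascot : Prop := ∀ (name : String), Dom_strip_mascot name → Spec_strip_mascot name (strip_mascot name)

-- ===== LEMMAS AND PROOFS =====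
def mySplit : List Char → List (List Char)
  | [] => [[]]
  | c :: r =>
    if c = ' ' then [] :: mySplit r
    else match mySplit r with
      | [] => [[c]]
      | w :: ws => (c :: w) :: ws

theorem mySplit_ne_nil (l : List Char) : mySplit l ≠ [] := by
  induction l with
  | nil => simp [mySplit]
  | cons c r ih =>
    simp only [mySplit]
    split_ifs
    · simp
    · cases h : mySplit r <;> simp

theorem go_spec (fuel : Nat) : ∀ (l cur : List Char) (acc : List (List Char)), l.length ≤ fuel →
    PySem.Chars.splitOn.go [' '] fuel l cur acc =
      acc.reverse ++ (cur.reverse ++ (mySplit l).headI) :: (mySplit l).tail := by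
  induction fuel with
  | zero =>
    intro l cur acc h
    have : l = [] := by cases l <;> simp_all
    subst this
    rw [PySem.Chars.splitOn.go]
    simp [mySplit]
  | succ fuel ih =>
    intro l cur acc h
    cases l with
    | nil =>
      rw [PySem.Chars.splitOn.go]
      · simp [mySplit]
      · omega
    | cons c rest =>
      rw [PySem.Chars.splitOn.go]
      by_cases hc : c = ' '
      · subst hc
        have hp : [' '].isPrefixOf (' ' :: rest) = true := by rfl
        rw [if_pos hp]
        show PySem.Chars.splitOn.go [' '] fuel rest [] (cur.reverse :: acc) = _
        rw [ih rest [] (cur.reverse :: acc) (by simpa using Nat.le_of_succ_le_succ (by simpa using h))]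
        have hms : mySplit (' ' :: rest) = [] :: mySplit rest := by simp [mySplit]
        rw [hms]
        cases hr : mySplit rest with
        | nil => exact absurd hr (mySplit_ne_nil rest)
        | cons w ws => simp
      · have hp : [' '].isPrefixOf (c :: rest) = false := by
          simp [List.isPrefixOf]; exact fun h' => absurd h'.symm hc
        rw [if_neg (by simp [hp])]
        rw [ih rest (c :: cur) acc (by simpa using Nat.le_of_succ_le_succ (by simpa using h))]
        have hms : mySplit (c :: rest) =
            match mySplit rest with
            | [] => [[c]]
            | w :: ws => (c :: w) :: ws := by simp [mySplit, hc]
        rw [hms]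
        cases hr : mySplit rest with
        | nil => exact absurd hr (mySplit_ne_nil rest)
        | cons w ws => simp

theorem splitOn_eq_mySplit (l : List Char) : PySem.Chars.splitOn l [' '] = mySplit l := by
  show PySem.Chars.splitOn.go [' '] (l.length + 1) l [] [] = _
  rw [go_spec (l.length + 1) l [] [] (by omega)]
  cases hr : mySplit l with
  | nil => exact absurd hr (mySplit_ne_nil l)
  | cons w ws => simp

theorem not_prefix_space {xs : List Char} (h : ' ' ∉ xs) : [' '].isPrefixOf xs = false := by
  cases xs with
  | nil => rfl
  | cons c r =>
    simp only [List.mem_cons, not_or] at h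
    simp [List.isPrefixOf]
    exact fun h' => h.1 h'

theorem rfind_go_nospace {l : List Char} (h : ' ' ∉ l) :
    ∀ k, PySem.Chars.rfind.go l [' '] k = -1 := by
  intro k
  induction k with
  | zero => rw [PySem.Chars.rfind.go, not_prefix_space h]; rfl
  | succ j ih =>
    rw [PySem.Chars.rfind.go]
    rw [not_prefix_space (fun hm => h ((List.drop_subset _ _) hm))]
    simpa using ih

theorem rfind_nospace {l : List Char} (h : ' ' ∉ l) : PySem.Chars.rfind l [' '] = -1 := by
  exact rfind_go_nospace h _

theorem rfind_go_last {p w : List Char} (hw : ' ' ∉ w) :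
    ∀ k, PySem.Chars.rfind.go (p ++ ' ' :: w) [' '] (p.length + k) = (p.length : Int) := by
  intro k
  induction k with
  | zero =>
    cases hp : p.length with
    | zero =>
      have : p = [] := List.eq_nil_of_length_eq_zero hp
      subst this
      rw [PySem.Chars.rfind.go]
      simp [List.isPrefixOf]
    | succ j =>
      simp only [Nat.add_zero]
      rw [PySem.Chars.rfind.go]
      have hd : (p ++ ' ' :: w).drop (j + 1) = ' ' :: w := by
        rw [← hp]; exact List.drop_left
      rw [hd]
      have hpre : [' '].isPrefixOf (' ' :: w) = true := by rfl
      rw [hpre]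
      simp [← hp]
  | succ k ih =>
    have h1 : p.length + (k + 1) = (p.length + k) + 1 := by omega
    rw [h1, PySem.Chars.rfind.go]
    have hd : (p ++ ' ' :: w).drop (p.length + k + 1) = w.drop k := by
      have : p.length + k + 1 = p.length + (k + 1) := by omega
      rw [this, List.drop_append]
      simp
    rw [hd, not_prefix_space (fun hm => hw ((List.drop_subset _ _) hm))]
    simpa using ih

theorem rfind_last_space {p w : List Char} (hw : ' ' ∉ w) :
    PySem.Chars.rfind (p ++ ' ' :: w) [' '] = (p.length : Int) := by
  show PySem.Chars.rfind.go _ [' '] (p ++ ' ' :: w).length = _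
  have : (p ++ ' ' :: w).length = p.length + (w.length + 1) := by simp
  rw [this]
  exact rfind_go_last hw _

theorem exists_last_space {l : List Char} (h : ' ' ∈ l) :
    ∃ p w, l = p ++ ' ' :: w ∧ ' ' ∉ w := by
  induction l using List.reverseRecOn with
  | nil => simp at h
  | append_singleton xs c ih =>
    by_cases hc : c = ' '
    · exact ⟨xs, [], by simp [hc], by simp⟩
    · have hx : ' ' ∈ xs := by
        rcases List.mem_append.mp h with h' | h'
        · exact h'
        · simp at h'; exact absurd h'.symm hc
      obtain ⟨p, w, hpw, hnw⟩ := ih hx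
      exact ⟨p, w ++ [c], by simp [hpw], by simp [hnw]; exact fun h' => absurd h'.symm hc⟩

theorem mySplit_mem_nospace (l : List Char) : ∀ w ∈ mySplit l, ' ' ∉ w := by
  induction l with
  | nil =>
    intro w hw
    simp [mySplit] at hw
    simp [hw]
  | cons c r ih =>
    intro w hw
    by_cases hc : c = ' '
    · subst hc
      have : mySplit (' ' :: r) = [] :: mySplit r := by simp [mySplit]
      rw [this, List.mem_cons] at hw
      rcases hw with hw | hw
      · simp [hw]
      · exact ih w hw
    · cases hr : mySplit r with
      | nil => exact absurd hr (mySplit_ne_nil r)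
      | cons v vs =>
        have : mySplit (c :: r) = (c :: v) :: vs := by simp [mySplit, hc, hr]
        rw [this, List.mem_cons] at hw
        rcases hw with hw | hw
        · subst hw
          intro hm
          rcases List.mem_cons.mp hm with hm | hm
          · exact hc hm.symm
          · exact ih v (by simp [hr]) hm
        · exact ih w (by simp [hr, hw])

theorem decompose_last_two {α : Type} (xs : List α) (h : 2 ≤ xs.length) :
    ∃ ws u v, xs = ws ++ [u, v] := by
  induction xs using List.reverseRecOn with
  | nil => simp at h
  | append_singleton ys c ih =>
    cases ys using List.reverseRecOn with
    | nil => simp at h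
    | append_singleton zs b => exact ⟨zs, b, c, by simp⟩

theorem mySplit_nospace {l : List Char} (h : ' ' ∉ l) : mySplit l = [l] := by
  induction l with
  | nil => rfl
  | cons c r ih =>
    simp only [List.mem_cons, not_or] at h
    simp only [mySplit, if_neg (Ne.symm h.1), ih h.2]

theorem mySplit_append (xs ys : List Char) :
    mySplit (xs ++ ' ' :: ys) = mySplit xs ++ mySplit ys := by
  induction xs with
  | nil => simp [mySplit]
  | cons c r ih =>
    by_cases hc : c = ' '
    · subst hc; simp [mySplit, ih]
    · simp only [List.cons_append, mySplit, if_neg hc, ih]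
      cases h : mySplit r with
      | nil => exact absurd h (mySplit_ne_nil r)
      | cons w ws => simp

theorem join_cons {w : List Char} {ws : List (List Char)} (h : ws ≠ []) :
    PySem.Chars.join [' '] (w :: ws) = w ++ ' ' :: PySem.Chars.join [' '] ws := by
  cases ws with
  | nil => exact absurd rfl h
  | cons v vs => simp [PySem.Chars.join, List.intercalate]

theorem join_append {ws vs : List (List Char)} (h : ws ≠ []) (h' : vs ≠ []) :
    PySem.Chars.join [' '] (ws ++ vs) =
      PySem.Chars.join [' '] ws ++ ' ' :: PySem.Chars.join [' '] vs := by
  induction ws with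
  | nil => exact absurd rfl h
  | cons w ws ih =>
    cases ws with
    | nil => simpa using join_cons h'
    | cons u us =>
      rw [List.cons_append, join_cons (by simp), join_cons (by simp), ih (by simp)]
      simp

theorem join_mySplit (l : List Char) : PySem.Chars.join [' '] (mySplit l) = l := by
  induction l with
  | nil => rfl
  | cons c r ih =>
    by_cases hc : c = ' '
    · subst hc
      have : mySplit (' ' :: r) = [] :: mySplit r := by simp [mySplit]
      rw [this, join_cons (mySplit_ne_nil r), ih]; rfl
    · simp only [mySplit, if_neg hc]
      cases h : mySplit r with
      | nil => exact absurd h (mySplit_ne_nil r)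
      | cons w ws =>
        rw [h] at ih
        cases ws with
        | nil => simp_all [PySem.Chars.join, List.intercalate]
        | cons u us =>
          rw [join_cons (by simp)] at ih ⊢
          simp_all


theorem join_singleton' (v : List Char) : PySem.Chars.join [' '] [v] = v := by
  simp [PySem.Chars.join, List.intercalate]

theorem slice_negI {α : Type} (l : List α) (k : Int) (hk : k < 0) :
    PySem.List.slice l none (some k) = l.take (l.length - (-k).toNat) := by
  simp only [PySem.List.slice, PySem.List.clampIdx]
  split_ifs with h1 h2 <;> simp_all <;> try omega

theorem pyGetD_negI {α : Type} (l : List α) (k : Int) (d : α)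
    (hk : k < 0) (h : -(l.length : Int) ≤ k) :
    PySem.List.pyGetD l k d = l.getD (l.length - (-k).toNat) d := by
  simp only [PySem.List.pyGetD, PySem.List.pyGet?, PySem.List.pyIdx?]
  rw [if_neg (by omega), if_pos (by omega)]
  simp [List.getD_eq_getElem?_getD]

theorem getD_append_fst {α : Type} (ws : List α) (u v d : α) :
    (ws ++ [u, v]).getD ws.length d = u := by
  induction ws with
  | nil => rfl
  | cons a t ih => simpa using ih

theorem getD_append_snd {α : Type} (ws : List α) (u v d : α) :
    (ws ++ [u, v]).getD (ws.length + 1) d = v := by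
  induction ws with
  | nil => rfl
  | cons a t ih => simpa using ih

theorem factA : multiWordMascots.map (fun m => mySplit m.toList) =
    mascotWordPairs.map (fun uv => [[], uv.1, uv.2]) := by decide

theorem factNodup : mascotWordPairs.Nodup := by decide

theorem pairForm_inj : Function.Injective
    (fun uv : List Char × List Char => [[], uv.1, uv.2]) := by
  rintro ⟨a, b⟩ ⟨c, d⟩ h
  simp only [List.cons.injEq, and_true] at h
  simp [h.2.1, h.2.2]

theorem mascot_decomp {m : String} (hm : m ∈ multiWordMascots) :
    ∃ uv ∈ mascotWordPairs, mySplit m.toList = [[], uv.1, uv.2] := by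
  have h := List.mem_map_of_mem (f := fun m => mySplit m.toList) hm
  rw [factA] at h
  obtain ⟨uv, huv, heq⟩ := List.mem_map.mp h
  exact ⟨uv, huv, heq.symm⟩

theorem pair_mascot {uv : List Char × List Char} (h : uv ∈ mascotWordPairs) :
    ∃ m ∈ multiWordMascots, mySplit m.toList = [[], uv.1, uv.2] := by
  have h2 := List.mem_map_of_mem (f := fun uv : List Char × List Char => [[], uv.1, uv.2]) h
  rw [← factA] at h2
  obtain ⟨m, hm, heq⟩ := List.mem_map.mp h2
  exact ⟨m, hm, heq⟩

theorem mascot_inj {m m' : String} (hm : m ∈ multiWordMascots) (hm' : m' ∈ multiWordMascots)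
    (h : mySplit m.toList = mySplit m'.toList) : m = m' := by
  have hnd : (multiWordMascots.map (fun m => mySplit m.toList)).Nodup := by
    rw [factA]
    exact factNodup.map pairForm_inj
  exact List.inj_on_of_nodup_map hnd hm hm' h

theorem mascot_toList {m : String} {u v : List Char} (h : mySplit m.toList = [[], u, v]) :
    m.toList = ' ' :: (u ++ ' ' :: v) := by
  have hj := join_mySplit m.toList
  rw [h, join_cons (by simp), join_cons (by simp), join_singleton'] at hj
  simpa using hj.symm

theorem endswith_iff_decomp {l u v : List Char} (hu : ' ' ∉ u) (hv : ' ' ∉ v) :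
    PySem.Chars.endswith l (' ' :: (u ++ ' ' :: v)) = true ↔
      ∃ ws, ws ≠ [] ∧ mySplit l = ws ++ [u, v] := by
  rw [show PySem.Chars.endswith l (' ' :: (u ++ ' ' :: v)) =
      (' ' :: (u ++ ' ' :: v)).isSuffixOf l from rfl]
  rw [List.isSuffixOf_iff_suffix]
  constructor
  · rintro ⟨p, hp⟩
    refine ⟨mySplit p, mySplit_ne_nil p, ?_⟩
    rw [← hp, mySplit_append p (u ++ ' ' :: v), mySplit_append u v,
      mySplit_nospace hu, mySplit_nospace hv]
    rfl
  · rintro ⟨ws, hne, hsp⟩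
    have hl := (join_mySplit l).symm
    rw [hsp, join_append hne (by simp), join_cons (by simp), join_singleton'] at hl
    exact ⟨PySem.Chars.join [' '] ws, hl.symm⟩

theorem loopA_eq_none {l : List Char} :
    ∀ ms : List String, (∀ m ∈ ms, PySem.Chars.endswith l m.toList = false) →
      stripLoopA ms l = none := by
  intro ms
  induction ms with
  | nil => intro _; rfl
  | cons m0 ms ih =>
    intro h
    simp only [stripLoopA]
    rw [if_neg (by simp [h m0 (by simp)]), ih (fun m hm => h m (by simp [hm]))]

theorem loopA_eq_some {l : List Char} {m : String} :
    ∀ ms : List String, m ∈ ms → PySem.Chars.endswith l m.toList = true →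
      (∀ m' ∈ ms, PySem.Chars.endswith l m'.toList = true → m' = m) →
      stripLoopA ms l =
        some (PySem.Chars.strip (PySem.List.slice l none (some (-(m.toList.length : Int))))) := by
  intro ms
  induction ms with
  | nil => intro h; simp at h
  | cons m0 ms ih =>
    intro hmem hend huniq
    by_cases h0 : PySem.Chars.endswith l m0.toList = true
    · have := huniq m0 (by simp) h0
      subst this
      simp only [stripLoopA]
      rw [if_pos h0]
    · have hm : m ∈ ms := by
        rcases List.mem_cons.mp hmem with h | h
        · exact absurd (h ▸ hend) h0
        · exact h
      simp only [stripLoopA]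
      rw [if_neg h0]
      exact ih hm hend (fun m' hm' he' => huniq m' (by simp [hm']) he')

-- ===== VERDICT (by name: the statement is the Claim_ definition above) =====
theorem strip_mascot_spec : Claim_equal_strip_mascot := by
  intro name _hdom
  show strip_mascot name = strip_mascot_alt name
  unfold strip_mascot strip_mascot_alt
  simp only [splitOn_eq_mySplit]
  by_cases hb : (3 ≤ (mySplit name.toList).length ∧
      (PySem.List.pyGetD (mySplit name.toList) (-2) [],
        PySem.List.pyGetD (mySplit name.toList) (-1) []) ∈ mascotWordSet)
  · -- a known two-word mascot ends the name
    obtain ⟨h3, hmem⟩ := hb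
    obtain ⟨ws, u, v, hdecomp⟩ := decompose_last_two (mySplit name.toList) (by omega)
    have hlen : (mySplit name.toList).length = ws.length + 2 := by rw [hdecomp]; simp
    have hg2 : PySem.List.pyGetD (mySplit name.toList) (-2) [] = u := by
      rw [pyGetD_negI _ _ _ (by omega) (by omega)]
      rw [show (mySplit name.toList).length - (-(-2:Int)).toNat = ws.length by omega, hdecomp]
      exact getD_append_fst ws u v []
    have hg1 : PySem.List.pyGetD (mySplit name.toList) (-1) [] = v := by
      rw [pyGetD_negI _ _ _ (by omega) (by omega)]
      rw [show (mySplit name.toList).length - (-(-1:Int)).toNat = ws.length + 1 by omega, hdecomp]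
      exact getD_append_snd ws u v []
    rw [hg2, hg1] at hmem
    have hpair : ((u, v) : List Char × List Char) ∈ mascotWordPairs := by
      have := hmem
      unfold mascotWordSet at this
      exact (PySem.Set.mem_ofList _ _).mp this
    have hwne : ws ≠ [] := by
      intro h; rw [h] at hlen; simp at hlen; omega
    have hu : ' ' ∉ u := mySplit_mem_nospace name.toList u (by rw [hdecomp]; simp)
    have hv : ' ' ∉ v := mySplit_mem_nospace name.toList v (by rw [hdecomp]; simp)
    obtain ⟨m, hm, hform⟩ := pair_mascot hpair
    have hml : m.toList = ' ' :: (u ++ ' ' :: v) := mascot_toList hform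
    have hends : PySem.Chars.endswith name.toList m.toList = true := by
      rw [hml]
      exact (endswith_iff_decomp hu hv).mpr ⟨ws, hwne, hdecomp⟩
    have huniq : ∀ m' ∈ multiWordMascots,
        PySem.Chars.endswith name.toList m'.toList = true → m' = m := by
      intro m' hm' he'
      obtain ⟨uv', huv', hform'⟩ := mascot_decomp hm'
      have hml' : m'.toList = ' ' :: (uv'.1 ++ ' ' :: uv'.2) := mascot_toList hform'
      have hu' : ' ' ∉ uv'.1 := mySplit_mem_nospace m'.toList uv'.1 (by rw [hform']; simp)
      have hv' : ' ' ∉ uv'.2 := mySplit_mem_nospace m'.toList uv'.2 (by rw [hform']; simp)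
      rw [hml'] at he'
      obtain ⟨ws', hwne', hdecomp'⟩ := (endswith_iff_decomp hu' hv').mp he'
      have heq2 : [u, v] = [uv'.1, uv'.2] :=
        (List.append_inj' (hdecomp ▸ hdecomp' : ws ++ [u, v] = ws' ++ [uv'.1, uv'.2]) rfl).2
      have huu : uv'.1 = u := by injection heq2 with h1 h2; exact h1.symm
      have hvv : uv'.2 = v := by
        injection heq2 with h1 h2; injection h2 with h3 _; exact h3.symm
      apply mascot_inj hm' hm
      rw [hform, hform', huu, hvv]
    rw [loopA_eq_some multiWordMascots hm hends huniq]
    have hlform : name.toList = PySem.Chars.join [' '] ws ++ m.toList := by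
      conv_lhs => rw [← join_mySplit name.toList, hdecomp]
      rw [join_append hwne (by simp), join_cons (by simp), join_singleton', hml]
    have hslice : PySem.List.slice name.toList none (some (-(m.toList.length : Int))) =
        PySem.Chars.join [' '] ws := by
      rw [slice_negI _ _ (by rw [hml]; simp; omega)]
      rw [hlform]
      have h1 : (PySem.Chars.join [' '] ws ++ m.toList).length -
          (-(-(m.toList.length : Int))).toNat = (PySem.Chars.join [' '] ws).length := by
        simp
      rw [h1]
      exact List.take_left
    have hsliceB : PySem.List.slice (mySplit name.toList) none (some (-2)) = ws := by
      rw [slice_negI _ _ (by omega)]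
      rw [show (mySplit name.toList).length - (-(-2:Int)).toNat = ws.length by omega, hdecomp]
      exact List.take_left
    rw [hslice, hg2, hg1, if_pos (And.intro h3 hmem), hsliceB]
  · -- no two-word mascot matches: both fall back to stripping the last word
    have hnone : ∀ m ∈ multiWordMascots, PySem.Chars.endswith name.toList m.toList = false := by
      intro m hm
      cases hend : PySem.Chars.endswith name.toList m.toList with
      | false => rfl
      | true =>
        exfalso
        obtain ⟨uv, huv, hform⟩ := mascot_decomp hm
        have hml : m.toList = ' ' :: (uv.1 ++ ' ' :: uv.2) := mascot_toList hform
        have hu : ' ' ∉ uv.1 := mySplit_mem_nospace m.toList uv.1 (by rw [hform]; simp)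
        have hv : ' ' ∉ uv.2 := mySplit_mem_nospace m.toList uv.2 (by rw [hform]; simp)
        rw [hml] at hend
        obtain ⟨ws, hwne, hdecomp⟩ := (endswith_iff_decomp hu hv).mp hend
        have hlen : (mySplit name.toList).length = ws.length + 2 := by rw [hdecomp]; simp
        have hwl : 1 ≤ ws.length := by
          cases ws with
          | nil => exact absurd rfl hwne
          | cons a t => simp
        apply hb
        constructor
        · omega
        · have hg2 : PySem.List.pyGetD (mySplit name.toList) (-2) [] = uv.1 := by
            rw [pyGetD_negI _ _ _ (by omega) (by omega)]
            rw [show (mySplit name.toList).length - (-(-2:Int)).toNat = ws.length by omega,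
              hdecomp]
            exact getD_append_fst ws uv.1 uv.2 []
          have hg1 : PySem.List.pyGetD (mySplit name.toList) (-1) [] = uv.2 := by
            rw [pyGetD_negI _ _ _ (by omega) (by omega)]
            rw [show (mySplit name.toList).length - (-(-1:Int)).toNat = ws.length + 1 by omega,
              hdecomp]
            exact getD_append_snd ws uv.1 uv.2 []
          rw [hg2, hg1]
          unfold mascotWordSet
          exact (PySem.Set.mem_ofList _ _).mpr huv
    rw [loopA_eq_none multiWordMascots hnone, if_neg hb]
    by_cases hsp : ' ' ∈ name.toList
    · obtain ⟨p, w, hpw, hnw⟩ := exists_last_space hsp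
      have hdecomp : mySplit name.toList = mySplit p ++ [w] := by
        rw [hpw, mySplit_append p w, mySplit_nospace hnw]
      have hrf : PySem.Chars.rfind name.toList [' '] = (p.length : Int) := by
        rw [hpw]; exact rfind_last_space hnw
      rw [hrf, if_neg (by omega)]
      have htake : name.toList.take ((p.length : Int)).toNat = p := by
        rw [hpw, Int.toNat_natCast]
        exact List.take_left
      have hlenw : 2 ≤ (mySplit name.toList).length := by
        rw [hdecomp]
        have h1 : 0 < (mySplit p).length := List.length_pos_of_ne_nil (mySplit_ne_nil p)
        simp only [List.length_append, List.length_cons, List.length_nil]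
        omega
      rw [if_pos hlenw]
      have hsliceB : PySem.List.slice (mySplit name.toList) none (some (-1)) = mySplit p := by
        rw [slice_negI _ _ (by omega)]
        rw [hdecomp]
        have : (mySplit p ++ [w]).length - (-(-1:Int)).toNat = (mySplit p).length := by
          simp
        rw [this]
        exact List.take_left
      rw [hsliceB, join_mySplit, htake]
    · have hrf : PySem.Chars.rfind name.toList [' '] = -1 := rfind_nospace hsp
      rw [hrf, if_pos rfl]
      have hone : mySplit name.toList = [name.toList] := mySplit_nospace hsp
      rw [if_neg (by rw [hone]; simp)]
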